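-- pv_equiv track=rewrite | github.com/nCoda/lychee | scripts/make_inbound_note_dicts.py | parse_languages
-- ===== SOURCE A (Python) =====
-- lisp_to_mei_accid_dict = {
--     'DOUBLE-FLAT': 'ff',
--     'THREE-Q-FLAT': '3qf',
--     'FLAT': 'f',
--     'SEMI-FLAT': '1qf',
--     'NATURAL': '',
--     'SEMI-SHARP': '1qs',
--     'SHARP': 's',
--     'THREE-Q-SHARP': '3qs',
--     'DOUBLE-SHARP': 'x'
--     }
--
-- lisp_pitch_class_to_mei_dict = {
--     0: 'c',
--     1: 'd',
--     2: 'e',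
--     3: 'f',
--     4: 'g',
--     5: 'a',
--     6: 'b'
-- }
--
-- def add_line_to_inbound_lookup_dict(current_language_dict, line):
--     stripped_line = line.strip()
--     split_line = line.split()
--     lisp_pitch_token = split_line[0][1:]
--     lisp_pitch_class_number = int(split_line[4])
--     lisp_accid_string = split_line[5][:-2]
--     the_tuple = (
--         lisp_pitch_class_to_mei_dict[lisp_pitch_class_number],
--         lisp_to_mei_accid_dict[lisp_accid_string]
--         )
--     current_language_dict[lisp_pitch_token] = the_tuple
--
-- def parse_languages(lines):
--     inbound_languages_dict = {}
--     current_language = None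
--     for line in lines:
--         if line[:5] == '    (' :
--             stripped_line  = line.strip()
--             split_line = stripped_line.split()
--             current_language = split_line[0][1:]
--             inbound_languages_dict[current_language] = {}
--         elif 'ly:make-pitch' in line:
--             add_line_to_inbound_lookup_dict(inbound_languages_dict[current_language], line)
--     return inbound_languages_dict
-- ===== SOURCE B (Python) =====
-- lisp_to_mei_accid_dict = {
--     'DOUBLE-FLAT': 'ff',
--     'THREE-Q-FLAT': '3qf',
--     'FLAT': 'f',
--     'SEMI-FLAT': '1qf',
--     'NATURAL': '',
--     'SEMI-SHARP': '1qs',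
--     'SHARP': 's',
--     'THREE-Q-SHARP': '3qs',
--     'DOUBLE-SHARP': 'x'
--     }
--
-- lisp_pitch_class_to_mei_dict = {
--     0: 'c',
--     1: 'd',
--     2: 'e',
--     3: 'f',
--     4: 'g',
--     5: 'a',
--     6: 'b'
-- }
--
--
-- def parse_languages(lines):
--     # Pass 1: segment the lines into per-language blocks of raw pitch lines.
--     blocks = []
--     current = None          # the pitch-line list of the open block (None before any header)
--     for line in lines:
--         if line[:5] == '    (':
--             current = []
--             blocks.append((line.strip().split()[0][1:], current))
--         elif 'ly:make-pitch' in line: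
--             current.append(line)
--     # Pass 2: parse each block's pitch lines with a comprehension.
--     result = {}
--     for name, pitch_lines in blocks:
--         result[name] = {
--             sl[0][1:]: (lisp_pitch_class_to_mei_dict[int(sl[4])],
--                         lisp_to_mei_accid_dict[sl[5][:-2]])
--             for sl in (pl.split() for pl in pitch_lines)
--         }
--     return result
-- ===== Notes on version B (the rewrite author's own statement) =====
-- stated objective: alternative
-- what changed: B replaces A's single stateful pass (a current-language cursor mutating nested dicts) by two passes: first segment the lines into per-language blocks of raw pitch lines, then build each language's sub-dict from its block with a dict comprehension.
import Mathlib
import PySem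

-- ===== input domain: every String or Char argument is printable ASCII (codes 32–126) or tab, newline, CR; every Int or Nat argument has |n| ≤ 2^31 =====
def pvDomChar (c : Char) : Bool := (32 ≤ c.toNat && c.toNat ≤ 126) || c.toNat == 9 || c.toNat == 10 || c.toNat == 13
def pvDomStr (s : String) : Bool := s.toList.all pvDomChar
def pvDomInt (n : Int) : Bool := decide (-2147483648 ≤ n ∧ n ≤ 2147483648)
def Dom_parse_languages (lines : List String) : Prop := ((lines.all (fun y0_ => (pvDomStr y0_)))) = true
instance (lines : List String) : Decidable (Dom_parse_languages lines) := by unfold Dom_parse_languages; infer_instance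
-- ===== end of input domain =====

-- B re-implements A as two passes (segment lines into per-language blocks, then build each
-- sub-dict from its block) instead of A's single stateful pass; same return value, not faster.

-- shared module-level constants (the two lookup dicts of the Python module)
def lispToMeiAccid : PySem.Dict String String := PySem.Dict.ofList
  [("DOUBLE-FLAT", "ff"), ("THREE-Q-FLAT", "3qf"), ("FLAT", "f"), ("SEMI-FLAT", "1qf"),
   ("NATURAL", ""), ("SEMI-SHARP", "1qs"), ("SHARP", "s"), ("THREE-Q-SHARP", "3qs"),
   ("DOUBLE-SHARP", "x")]

def lispPitchClassToMei : PySem.Dict Int String := PySem.Dict.ofList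
  [(0, "c"), (1, "d"), (2, "e"), (3, "f"), (4, "g"), (5, "a"), (6, "b")]

-- line.strip().split()[0][1:]  (split of a stripped header line is nonempty; [] unreachable there)
def headerName (line : String) : String :=
  match PySem.Str.split₀ (PySem.Str.strip line) with
  | t :: _ => PySem.Str.slice t (some 1) none
  | [] => ""

-- ===== PORT A =====
-- add_line_to_inbound_lookup_dict: mutates the sub-dict.  Where the Python raises
-- (IndexError on split_line[4]/[5], ValueError from int(), KeyError from the lookup dicts)
-- the port returns the dict unchanged; Pre_ excludes exactly those inputs.
def addLine (current_language_dict : PySem.Dict String (String × String)) (line : String) :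
    PySem.Dict String (String × String) :=
  let split_line := PySem.Str.split₀ line
  match split_line[0]?, split_line[4]?, split_line[5]? with
  | some t0, some t4, some t5 =>
    let lisp_pitch_token := PySem.Str.slice t0 (some 1) none
    match PySem.Int.ofStr? t4 with
    | some n =>
      match lispPitchClassToMei.get? n, lispToMeiAccid.get? (PySem.Str.slice t5 none (some (-2))) with
      | some pc, some ac => current_language_dict.insert lisp_pitch_token (pc, ac)
      | _, _ => current_language_dict
    | none => current_language_dict
  | _, _, _ => current_language_dict

-- one iteration of A's for-loop over (inbound_languages_dict, current_language)
def stepA (st : PySem.Dict String (PySem.Dict String (String × String)) × Option String)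
    (line : String) :
    PySem.Dict String (PySem.Dict String (String × String)) × Option String :=
  if PySem.Str.slice line none (some 5) == "    (" then
    let current_language := headerName line
    (st.1.insert current_language PySem.Dict.empty, some current_language)
  else if PySem.Str.isIn "ly:make-pitch" line then
    match st.2 with
    | some c => (st.1.modify c PySem.Dict.empty (fun sub => addLine sub line), st.2)
    | none => st      -- Python: KeyError (pitch line before any header); excluded by Pre_
  else st

def parse_languages (lines : List String) : List (String × List (String × String × String)) :=
  ((lines.foldl stepA (PySem.Dict.empty, none)).1.items).map (fun p => (p.1, p.2.items))

-- ===== PORT B =====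
-- parse one ly:make-pitch line into its dict entry (none exactly where the Python raises)
def parseEntry (line : String) : Option (String × String × String) :=
  let sl := PySem.Str.split₀ line
  match sl[0]?, sl[4]?, sl[5]? with
  | some t0, some t4, some t5 =>
    match PySem.Int.ofStr? t4 with
    | some n =>
      match lispPitchClassToMei.get? n, lispToMeiAccid.get? (PySem.Str.slice t5 none (some (-2))) with
      | some pc, some ac => some (PySem.Str.slice t0 (some 1) none, pc, ac)
      | _, _ => none
    | none => none
  | _, _, _ => none

-- pass 1 step: the open block ('current') is always the LAST block of the list, so
-- 'current.append(line)' is an append to the last block's line list; with no open block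
-- the Python raises (AttributeError on None), excluded by Pre_.
def segStep (bs : List (String × List String)) (line : String) : List (String × List String) :=
  if PySem.Str.slice line none (some 5) == "    (" then
    bs ++ [(headerName line, [])]
  else if PySem.Str.isIn "ly:make-pitch" line then
    match bs.getLast? with
    | some (n, ps) => bs.dropLast ++ [(n, ps ++ [line])]
    | none => bs
  else bs

-- pass 2: the dict comprehension over one block's pitch lines
def parseBlock (ps : List String) : PySem.Dict String (String × String) :=
  ps.foldl (fun d p =>
    match parseEntry p with
    | some (t, v) => d.insert t v
    | none => d) PySem.Dict.empty

def parse_languages_alt (lines : List String) : List (String × List (String × String × String)) :=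
  let blocks := lines.foldl segStep []
  let result := blocks.foldl (fun r nb => r.insert nb.1 (parseBlock nb.2)) PySem.Dict.empty
  result.items.map (fun p => (p.1, p.2.items))

-- ===== PRECONDITION & SPEC =====
-- Pre_ helpers (independent of the ports): which lines are headers / pitch lines, and
-- whether a pitch line is well formed (≥ 6 tokens, token 4 an int 0..6, token 5 minus
-- its last two characters one of the nine accidental names).
def isHeaderLine (line : String) : Bool := PySem.Str.slice line none (some 5) == "    ("

def isPitchLine (line : String) : Bool :=
  !isHeaderLine line && PySem.Str.isIn "ly:make-pitch" line

def wfPitch (line : String) : Bool :=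
  match (PySem.Str.split₀ line)[4]?, (PySem.Str.split₀ line)[5]? with
  | some t4, some t5 =>
    (match PySem.Int.ofStr? t4 with
     | some n => decide (0 ≤ n ∧ n ≤ 6)
     | none => false)
    && decide (PySem.Str.slice t5 none (some (-2)) ∈
        ["DOUBLE-FLAT", "THREE-Q-FLAT", "FLAT", "SEMI-FLAT", "NATURAL",
         "SEMI-SHARP", "SHARP", "THREE-Q-SHARP", "DOUBLE-SHARP"])
  | _, _ => false

-- Pre_ excludes exactly the inputs on which the Python A raises: a ly:make-pitch line
-- before any header line (KeyError) and malformed pitch lines (IndexError/ValueError/KeyError).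
def Pre_parse_languages (lines : List String) : Prop :=
  ∀ i : Fin lines.length, isPitchLine lines[i] = true →
    (∃ j : Fin lines.length, (j : Nat) < (i : Nat) ∧ isHeaderLine lines[j] = true) ∧
    wfPitch lines[i] = true
instance (lines : List String) : Decidable (Pre_parse_languages lines) := by
  unfold Pre_parse_languages; infer_instance

def pvWitness_parse_languages : List String :=
  ["    (nederlands . (", "        (c . ,(ly:make-pitch -1 0 NATURAL))",
   "        (cis . ,(ly:make-pitch -1 0 SHARP))"]

def Spec_parse_languages (lines : List String) (out : List (String × List (String × String × String))) : Prop := out = parse_languages_alt lines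
instance (lines : List String) (out : List (String × List (String × String × String))) : Decidable (Spec_parse_languages lines out) := by unfold Spec_parse_languages; infer_instance

-- ===== CLAIM (what is proved, stated in full; the proofs are below) =====
def Claim_equal_parse_languages : Prop := ∀ (lines : List String), Dom_parse_languages lines → Pre_parse_languages lines → Spec_parse_languages lines (parse_languages lines)

-- ===== LEMMAS AND PROOFS =====

-- B's pass-2 assembly starting from an arbitrary outer dict
def assemble (r : PySem.Dict String (PySem.Dict String (String × String)))
    (bs : List (String × List String)) :
    PySem.Dict String (PySem.Dict String (String × String)) :=
  bs.foldl (fun r nb => r.insert nb.1 (parseBlock nb.2)) r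

theorem addLine_eq (d : PySem.Dict String (String × String)) (line : String) :
    addLine d line = match parseEntry line with
      | some (t, v) => d.insert t v
      | none => d := by
  unfold addLine parseEntry
  repeat' split <;> simp_all

theorem parseBlock_append (ps : List String) (l : String) :
    parseBlock (ps ++ [l]) = match parseEntry l with
      | some (t, v) => (parseBlock ps).insert t v
      | none => parseBlock ps := by
  unfold parseBlock
  rw [List.foldl_append]
  rfl

theorem assemble_append (r : PySem.Dict String (PySem.Dict String (String × String)))
    (bs : List (String × List String)) (n : String) (ps : List String) :
    assemble r (bs ++ [(n, ps)]) = (assemble r bs).insert n (parseBlock ps) := by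
  unfold assemble
  rw [List.foldl_append]
  rfl

theorem step_eq (r : PySem.Dict String (PySem.Dict String (String × String)))
    (bs : List (String × List String)) (l : String) :
    stepA (assemble r bs, bs.getLast?.map Prod.fst) l
      = (assemble r (segStep bs l), (segStep bs l).getLast?.map Prod.fst) := by
  rcases List.eq_nil_or_concat bs with rfl | ⟨init, ⟨n, ps⟩, rfl⟩
  · unfold stepA segStep
    split
    · rw [assemble_append]
      simp [parseBlock]
    · split
      · rfl
      · rfl
  · simp only [List.concat_eq_append]
    unfold stepA segStep
    simp only [List.getLast?_concat, Option.map_some]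
    split
    · simp only [assemble_append]
      simp [parseBlock]
    · split
      · rw [List.dropLast_concat, assemble_append, assemble_append, PySem.Dict.modify,
            PySem.Dict.getD_insert_self, PySem.Dict.insert_insert_self,
            addLine_eq, parseBlock_append]
        simp
      · simp

theorem fold_eq (lines : List String) :
    ∀ (bs : List (String × List String)) (r : PySem.Dict String (PySem.Dict String (String × String))),
    lines.foldl stepA (assemble r bs, bs.getLast?.map Prod.fst)
      = (assemble r (lines.foldl segStep bs), (lines.foldl segStep bs).getLast?.map Prod.fst) := by
  induction lines with
  | nil => intro bs r; rfl
  | cons l rest ih =>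
    intro bs r
    simp only [List.foldl_cons, step_eq r bs l]
    exact ih (segStep bs l) r

theorem ports_agree (lines : List String) : parse_languages lines = parse_languages_alt lines := by
  unfold parse_languages parse_languages_alt
  have h := fold_eq lines [] PySem.Dict.empty
  simp only [assemble, List.foldl_nil, List.getLast?_nil, Option.map_none] at h
  rw [h]

-- ===== VERDICT (by name: the statement is the Claim_ definition above) =====
theorem parse_languages_spec : Claim_equal_parse_languages := by
  intro lines _ _
  unfold Spec_parse_languages
  exact ports_agree lines
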